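/-
  THE BRIDGE between the post of `qsort` (`Vorbis.Spec.RecordsKept`, Vorbis/Spec/LibcSort.lean: stated with `Mem.readLE`, so
  that the Spec files do not import the decoder-level files) and the decoder level's `Vorbis.RecordsPreserved`
  (Vorbis/Floor.lean: stated with `mem.u8`). `mem.u8 a` IS `mem.readLE (UInt64.ofNat a) 1` (Vorbis/Fields/Core.lean: `Mem.u8`,
  `Vorbis.addr`), so the two say the same.
-/
import Vorbis.Spec.LibcSort
import Vorbis.Floor
namespace Vorbis.Spec
open X86 X86.User

/-- The byte read of the decoder level, unfolded: `mem.u8 a` is the one-byte `readLE` at the word of `a`. -/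
theorem u8_eq_readLE (mem : Mem) (a : Nat) : mem.u8 a = mem.readLE (UInt64.ofNat a) 1 := id rfl

/-- **`RecordsKept` is `RecordsPreserved`.** -/
theorem recordsKept_iff (mem mem' : Mem) (base w n : Nat) :
    RecordsKept mem mem' base w n ↔ Vorbis.RecordsPreserved mem mem' base w n := by
  unfold RecordsKept Vorbis.RecordsPreserved
  simp only [u8_eq_readLE]

/-- The post of `qsort` / `sift_down`, as the floor-1 invariant (FL9) reads it. -/
theorem RecordsKept.preserved {mem mem' : Mem} {base w n : Nat} (h : RecordsKept mem mem' base w n) :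
    Vorbis.RecordsPreserved mem mem' base w n :=
  (recordsKept_iff mem mem' base w n).mp h

end Vorbis.Spec
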